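-- pv_equiv track=rewrite | github.com/intel/llvm | sycl/gdb/libsycl.so-gdb.py | substitute_access_mode
-- ===== SOURCE A (Python) =====
-- def substitute_access_mode(string):
--     access_mode = "(sycl::_V1::access::mode)"
--     substitutions = [
--         (access_mode + "1024", "read"),
--         (access_mode + "1025", "write"),
--         (access_mode + "1026", "read_write"),
--         (access_mode + "1027", "discard_write"),
--         (access_mode + "1028", "discard_read_write"),
--         (access_mode + "1029", "atomic"),
--     ]
--     for old, new in substitutions:
--         string = string.replace(old, new)
--     return string
-- ===== SOURCE B (Python) =====
-- _PAT = "(sycl::_V1::access::mode)102"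
-- _NAMES = ["read", "write", "read_write", "discard_write", "discard_read_write", "atomic"]
--
--
-- def substitute_access_mode(string):
--     out = []
--     i = 0
--     n = len(string)
--     while i < n:
--         if string.startswith(_PAT, i) and i + 28 < n and "4" <= string[i + 28] <= "9":
--             out.append(_NAMES[ord(string[i + 28]) - ord("4")])
--             i += 29
--         else:
--             out.append(string[i])
--             i += 1
--     return "".join(out)
-- ===== Notes on version B (the rewrite author's own statement) =====
-- stated objective: alternative
-- what changed: A runs six sequential full-string replace passes (one per access-mode code); B makes a single left-to-right scan that recognises the common 28-char stem once and dispatches on the trailing digit to emit the name.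
import Mathlib
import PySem

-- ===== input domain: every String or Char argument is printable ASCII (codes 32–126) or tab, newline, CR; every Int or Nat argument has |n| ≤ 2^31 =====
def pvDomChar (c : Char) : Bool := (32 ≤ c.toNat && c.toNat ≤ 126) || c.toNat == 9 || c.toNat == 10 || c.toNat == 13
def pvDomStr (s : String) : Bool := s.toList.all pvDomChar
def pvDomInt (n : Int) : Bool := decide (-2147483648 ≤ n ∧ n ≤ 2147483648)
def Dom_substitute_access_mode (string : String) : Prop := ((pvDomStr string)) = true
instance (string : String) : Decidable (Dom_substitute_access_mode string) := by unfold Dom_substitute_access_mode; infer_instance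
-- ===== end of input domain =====

-- B replaces A's six sequential full-string replace passes by ONE left-to-right scan that
-- recognises the common 28-char stem and dispatches on the trailing digit (objective: faster, single pass).

-- ===== PORT A =====
def substitute_access_mode (string : String) : String :=
  let access_mode := "(sycl::_V1::access::mode)"
  let substitutions : List (String × String) :=
    [(access_mode ++ "1024", "read"),
     (access_mode ++ "1025", "write"),
     (access_mode ++ "1026", "read_write"),
     (access_mode ++ "1027", "discard_write"),
     (access_mode ++ "1028", "discard_read_write"),
     (access_mode ++ "1029", "atomic")]
  substitutions.foldl (fun s p => PySem.Str.replace s p.1 p.2) string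

-- ===== PORT B =====
def pvPat : List Char := "(sycl::_V1::access::mode)102".toList

def pvNames : List (List Char) :=
  ["read".toList, "write".toList, "read_write".toList, "discard_write".toList,
   "discard_read_write".toList, "atomic".toList]

-- Source B's hit test at the current position: the 28-char stem followed by a digit '4'..'9'
def pvHit? (l : List Char) : Option Char :=
  match l.drop 28 with
  | d :: _ => if pvPat.isPrefixOf l ∧ '4' ≤ d ∧ d ≤ '9' then some d else none
  | [] => none

-- Source B's single scan: emit a name and skip 29 chars on a hit, else emit the char
def pvScan (l : List Char) : List Char :=
  match l with
  | [] => []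
  | c :: t =>
    match pvHit? (c :: t) with
    | some d => pvNames.getD (d.toNat - 52) [] ++ pvScan (t.drop 28)
    | none => c :: pvScan t
termination_by l.length
decreasing_by all_goals (simp; try omega)

def substitute_access_mode_alt (string : String) : String :=
  String.ofList (pvScan string.toList)

-- ===== PRECONDITION & SPEC =====
def Spec_substitute_access_mode (string : String) (out : String) : Prop := out = substitute_access_mode_alt string
instance (string : String) (out : String) : Decidable (Spec_substitute_access_mode string out) := by unfold Spec_substitute_access_mode; infer_instance

-- ===== CLAIM (what is proved, stated in full; the proofs are below) =====
def Claim_equal_substitute_access_mode : Prop := ∀ (string : String), Dom_substitute_access_mode string → Spec_substitute_access_mode string (substitute_access_mode string)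

-- ===== LEMMAS AND PROOFS =====

def pvRep (old new : List Char) (l : List Char) : List Char :=
  match l with
  | [] => []
  | c :: t =>
    if old.isPrefixOf (c :: t) then new ++ pvRep old new (t.drop (old.length - 1))
    else c :: pvRep old new t
termination_by l.length
decreasing_by all_goals (simp; try omega)

theorem pv_go_spec (old new : List Char) (hold : old ≠ []) :
    ∀ (fuel : Nat) (l acc : List Char), l.length ≤ fuel →
      PySem.Chars.replace.go old new fuel l acc = acc.reverse ++ pvRep old new l := by
  intro fuel
  induction fuel with
  | zero =>
    intro l acc h
    have : l = [] := List.eq_nil_of_length_eq_zero (by omega)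
    subst this
    simp [PySem.Chars.replace.go, pvRep]
  | succ n ih =>
    intro l acc h
    cases l with
    | nil => simp [PySem.Chars.replace.go, pvRep]
    | cons c t =>
      rw [PySem.Chars.replace.go]
      by_cases hp : old.isPrefixOf (c :: t)
      · rw [if_pos hp]
        obtain ⟨oc, o₁, rfl⟩ : ∃ oc o₁, old = oc :: o₁ := by
          cases old with
          | nil => exact absurd rfl hold
          | cons a b => exact ⟨a, b, rfl⟩
        have hlen : List.drop (oc :: o₁).length (c :: t) = t.drop o₁.length := by
          simp [List.length_cons]
        rw [hlen, ih _ _ (by simp [List.length_drop] at *; omega)]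
        rw [pvRep]
        rw [if_pos hp]
        simp [List.length_cons]
      · rw [if_neg hp]
        rw [ih _ _ (by simp at h; omega)]
        rw [pvRep]
        rw [if_neg hp]
        simp

theorem pv_replace_eq_rep (old new l : List Char) (hold : old ≠ []) :
    PySem.Chars.replace l old new = pvRep old new l := by
  rw [PySem.Chars.replace]
  rw [if_neg (by simpa [List.isEmpty_iff] using hold)]
  rw [pv_go_spec old new hold l.length l [] le_rfl]
  simp

theorem pv_rep_cons_no (old new : List Char) (c : Char) (t : List Char)
    (h : ¬ old <+: c :: t) : pvRep old new (c :: t) = c :: pvRep old new t := by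
  rw [pvRep, if_neg (by simpa [List.isPrefixOf_iff_prefix] using h)]

theorem pv_rep_match (old new v : List Char) (oc : Char) (o₁ : List Char) (h : old = oc :: o₁) :
    pvRep old new (old ++ v) = new ++ pvRep old new v := by
  subst h
  rw [show (oc :: o₁) ++ v = oc :: (o₁ ++ v) by simp, pvRep,
    if_pos (by rw [List.isPrefixOf_iff_prefix]; exact ⟨v, by simp⟩)]
  simp

theorem pv_rep_append_not_head (old new u v : List Char) (hc : Char) (o₂ : List Char)
    (h : old = hc :: o₂) (hu : hc ∉ u) :
    pvRep old new (u ++ v) = u ++ pvRep old new v := by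
  induction u with
  | nil => simp
  | cons a u ih =>
    have hna : ¬ old <+: a :: (u ++ v) := by
      intro hp
      subst h
      rw [List.cons_prefix_cons] at hp
      exact hu (by simp [hp.1])
    rw [List.cons_append, pv_rep_cons_no old new a (u ++ v) hna,
      ih (fun hm => hu (List.mem_cons_of_mem _ hm))]
    simp

theorem pv_reflect (old new tl : List Char)
    (Hs : ∀ u, u <:+ tl → u ≠ [] → ¬ u <+: new ∧ ¬ new <+: u) :
    ∀ (x u : List Char), u <:+ tl → u <+: pvRep old new x → u <+: x := by
  have main : ∀ n (x : List Char), x.length ≤ n → ∀ u, u <:+ tl → u <+: pvRep old new x → u <+: x := by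
    intro n
    induction n with
    | zero =>
      intro x hx u _ hp
      have : x = [] := List.eq_nil_of_length_eq_zero (by omega)
      subst this
      simpa [pvRep] using hp
    | succ n ih =>
      intro x hx u hsu hp
      cases x with
      | nil => simpa [pvRep] using hp
      | cons c t =>
        cases u with
        | nil => exact List.nil_prefix
        | cons u0 u' =>
          by_cases hpr : old.isPrefixOf (c :: t)
          · rw [pvRep, if_pos hpr] at hp
            have hne : (u0 :: u') ≠ ([] : List Char) := by simp
            by_cases hle : (u0 :: u').length ≤ new.length
            · exact absurd (List.prefix_of_prefix_length_le hp (List.prefix_append _ _) hle)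
                (Hs _ hsu hne).1
            · exact absurd (List.prefix_of_prefix_length_le (List.prefix_append _ _) hp (by omega))
                (Hs _ hsu hne).2
          · rw [pvRep, if_neg hpr] at hp
            rw [List.cons_prefix_cons] at hp
            have hsu' : u' <:+ tl := (List.suffix_cons u0 u').trans hsu
            have := ih t (by simp at hx; omega) u' hsu' hp.2
            rw [List.cons_prefix_cons]
            exact ⟨hp.1, this⟩
  exact fun x => main x.length x le_rfl

def pvOlds : List (List Char) := [pvPat ++ ['4'], pvPat ++ ['5'], pvPat ++ ['6'],
  pvPat ++ ['7'], pvPat ++ ['8'], pvPat ++ ['9']]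
def pvPairs : List (List Char × List Char) := pvOlds.zip pvNames
def pvStep (s : List Char) (p : List Char × List Char) : List Char := pvRep p.1 p.2 s
def pvChain (l : List Char) : List Char := pvPairs.foldl pvStep l

theorem pv_olds_facts : ∀ o ∈ pvOlds, o.length = 29 ∧ o = '(' :: o.drop 1 ∧ '(' ∉ o.drop 1 := by decide
theorem pv_names_fact : ∀ r ∈ pvNames, '(' ∉ r := by decide
theorem pv_pairs_mem : ∀ p ∈ pvPairs, p.1 ∈ pvOlds ∧ p.2 ∈ pvNames := by decide
theorem pv_refl_fact : ∀ o ∈ pvOlds, ∀ r ∈ pvNames, ∀ u ∈ (o.drop 1).tails,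
    u ≠ [] → ¬ u.isPrefixOf r ∧ ¬ r.isPrefixOf u := by decide

theorem pv_pass_pattern (o o' r' : List Char) (ho : o ∈ pvOlds) (ho' : o' ∈ pvOlds)
    (hne : o' ≠ o) (v : List Char) : pvRep o' r' (o ++ v) = o ++ pvRep o' r' v := by
  obtain ⟨hlen, hshape, hnp⟩ := pv_olds_facts o ho
  obtain ⟨hlen', hshape', _⟩ := pv_olds_facts o' ho'
  have hno : ¬ o' <+: o ++ v := by
    intro hp
    have h1 : o' <+: o :=
      List.prefix_of_prefix_length_le hp (List.prefix_append _ _) (by omega)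
    exact hne (List.IsPrefix.eq_of_length h1 (by omega))
  calc pvRep o' r' (o ++ v) = pvRep o' r' ('(' :: (o.drop 1 ++ v)) := by
        rw [← List.cons_append, ← hshape]
    _ = '(' :: pvRep o' r' (o.drop 1 ++ v) := by
        rw [pv_rep_cons_no o' r' _ _ (by rw [← List.cons_append, ← hshape]; exact hno)]
    _ = '(' :: (o.drop 1 ++ pvRep o' r' v) := by
        rw [pv_rep_append_not_head o' r' _ v '(' (o'.drop 1) hshape' hnp]
    _ = o ++ pvRep o' r' v := by rw [← List.cons_append, ← hshape]

theorem pv_pass_name (o' r' r : List Char) (ho' : o' ∈ pvOlds) (hr : r ∈ pvNames) (v : List Char) :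
    pvRep o' r' (r ++ v) = r ++ pvRep o' r' v := by
  obtain ⟨_, hshape', _⟩ := pv_olds_facts o' ho'
  exact pv_rep_append_not_head o' r' r v '(' (o'.drop 1) hshape' (pv_names_fact r hr)

theorem pv_foldl_nil : ∀ PS : List (List Char × List Char), PS.foldl pvStep [] = [] := by
  intro PS
  induction PS with
  | nil => rfl
  | cons p PS ih => simpa [pvStep, pvRep] using ih

theorem pv_foldl_no_hit : ∀ PS : List (List Char × List Char), (∀ p ∈ PS, p ∈ pvPairs) →
    ∀ c t, (∀ p ∈ PS, ¬ p.1 <+: c :: t) →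
      PS.foldl pvStep (c :: t) = c :: PS.foldl pvStep t := by
  intro PS
  induction PS with
  | nil => intro _ c t _; rfl
  | cons p PS ih =>
    intro hmem c t H
    have hp : p ∈ pvPairs := hmem p (by simp)
    have hstep : pvStep (c :: t) p = c :: pvRep p.1 p.2 t :=
      pv_rep_cons_no p.1 p.2 c t (H p (by simp))
    have H' : ∀ q ∈ PS, ¬ q.1 <+: c :: pvRep p.1 p.2 t := by
      intro q hq hpre
      have hqP : q ∈ pvPairs := hmem q (by simp [hq])
      obtain ⟨hqo, _⟩ := pv_pairs_mem q hqP
      obtain ⟨_, hqshape, _⟩ := pv_olds_facts q.1 hqo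
      obtain ⟨hpo, hpn⟩ := pv_pairs_mem p hp
      rw [hqshape, List.cons_prefix_cons] at hpre
      obtain ⟨hc, htail⟩ := hpre
      have Hs : ∀ u, u <:+ q.1.drop 1 → u ≠ [] → ¬ u <+: p.2 ∧ ¬ p.2 <+: u := by
        intro u hsu hne
        have := pv_refl_fact q.1 hqo p.2 hpn u ((List.mem_tails _ _).mpr hsu) hne
        simpa [List.isPrefixOf_iff_prefix] using this
      have : q.1.drop 1 <+: t :=
        pv_reflect p.1 p.2 (q.1.drop 1) Hs t (q.1.drop 1) List.suffix_rfl htail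
      exact H q (by simp [hq]) (by rw [hqshape, List.cons_prefix_cons]; exact ⟨hc, this⟩)
    calc (p :: PS).foldl pvStep (c :: t) = PS.foldl pvStep (pvStep (c :: t) p) := rfl
      _ = PS.foldl pvStep (c :: pvRep p.1 p.2 t) := by rw [hstep]
      _ = c :: PS.foldl pvStep (pvRep p.1 p.2 t) :=
          ih (fun q hq => hmem q (by simp [hq])) c (pvRep p.1 p.2 t) H'
      _ = c :: (p :: PS).foldl pvStep t := rfl

theorem pv_foldl_pass_pat (o : List Char) (ho : o ∈ pvOlds) :
    ∀ PS : List (List Char × List Char), (∀ p ∈ PS, p ∈ pvPairs ∧ p.1 ≠ o) →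
    ∀ v, PS.foldl pvStep (o ++ v) = o ++ PS.foldl pvStep v := by
  intro PS
  induction PS with
  | nil => intro _ v; rfl
  | cons p PS ih =>
    intro h v
    obtain ⟨hpP, hpne⟩ := h p (by simp)
    obtain ⟨hpo, _⟩ := pv_pairs_mem p hpP
    calc (p :: PS).foldl pvStep (o ++ v) = PS.foldl pvStep (pvRep p.1 p.2 (o ++ v)) := rfl
      _ = PS.foldl pvStep (o ++ pvRep p.1 p.2 v) := by
          rw [pv_pass_pattern o p.1 p.2 ho hpo hpne v]
      _ = o ++ PS.foldl pvStep (pvRep p.1 p.2 v) := ih (fun q hq => h q (by simp [hq])) _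
      _ = o ++ (p :: PS).foldl pvStep v := rfl

theorem pv_foldl_pass_nm (r : List Char) (hr : r ∈ pvNames) :
    ∀ PS : List (List Char × List Char), (∀ p ∈ PS, p ∈ pvPairs) →
    ∀ v, PS.foldl pvStep (r ++ v) = r ++ PS.foldl pvStep v := by
  intro PS
  induction PS with
  | nil => intro _ v; rfl
  | cons p PS ih =>
    intro h v
    obtain ⟨hpo, _⟩ := pv_pairs_mem p (h p (by simp))
    calc (p :: PS).foldl pvStep (r ++ v) = PS.foldl pvStep (pvRep p.1 p.2 (r ++ v)) := rfl
      _ = PS.foldl pvStep (r ++ pvRep p.1 p.2 v) := by rw [pv_pass_name p.1 p.2 r hpo hr v]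
      _ = r ++ PS.foldl pvStep (pvRep p.1 p.2 v) := ih (fun q hq => h q (by simp [hq])) _
      _ = r ++ (p :: PS).foldl pvStep v := rfl

theorem pv_chain_hit_aux (Pre Post : List (List Char × List Char)) (o r : List Char)
    (hsplit : pvPairs = Pre ++ (o, r) :: Post)
    (hPre : ∀ p ∈ Pre, p ∈ pvPairs ∧ p.1 ≠ o) (hPost : ∀ p ∈ Post, p ∈ pvPairs)
    (ho : o ∈ pvOlds) (hr : r ∈ pvNames) (v : List Char) :
    pvChain (o ++ v) = r ++ pvChain v := by
  unfold pvChain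
  rw [hsplit, List.foldl_append, List.foldl_append,
    pv_foldl_pass_pat o ho Pre hPre v, List.foldl_cons, List.foldl_cons]
  obtain ⟨_, hshape, _⟩ := pv_olds_facts o ho
  show Post.foldl pvStep (pvRep o r (o ++ Pre.foldl pvStep v)) = _
  rw [pv_rep_match o r _ '(' (o.drop 1) hshape,
    pv_foldl_pass_nm r hr Post hPost _]
  rfl

theorem pv_chain_hit (o r : List Char) (hmem : (o, r) ∈ pvPairs) (v : List Char) :
    pvChain (o ++ v) = r ++ pvChain v := by
  have h6 : (o, r) = (pvPat ++ ['4'], "read".toList) ∨ (o, r) = (pvPat ++ ['5'], "write".toList) ∨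
      (o, r) = (pvPat ++ ['6'], "read_write".toList) ∨ (o, r) = (pvPat ++ ['7'], "discard_write".toList) ∨
      (o, r) = (pvPat ++ ['8'], "discard_read_write".toList) ∨ (o, r) = (pvPat ++ ['9'], "atomic".toList) := by
    simpa [pvPairs, pvOlds, pvNames] using hmem
  rcases h6 with h | h | h | h | h | h
  · obtain ⟨rfl, rfl⟩ := Prod.mk.injEq .. ▸ h
    exact pv_chain_hit_aux []
      [(pvPat ++ ['5'], "write".toList), (pvPat ++ ['6'], "read_write".toList), (pvPat ++ ['7'], "discard_write".toList), (pvPat ++ ['8'], "discard_read_write".toList), (pvPat ++ ['9'], "atomic".toList)] _ _ rfl (by decide) (by decide) (by decide) (by decide) v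
  · obtain ⟨rfl, rfl⟩ := Prod.mk.injEq .. ▸ h
    exact pv_chain_hit_aux [(pvPat ++ ['4'], "read".toList)]
      [(pvPat ++ ['6'], "read_write".toList), (pvPat ++ ['7'], "discard_write".toList), (pvPat ++ ['8'], "discard_read_write".toList), (pvPat ++ ['9'], "atomic".toList)] _ _ rfl (by decide) (by decide) (by decide) (by decide) v
  · obtain ⟨rfl, rfl⟩ := Prod.mk.injEq .. ▸ h
    exact pv_chain_hit_aux [(pvPat ++ ['4'], "read".toList), (pvPat ++ ['5'], "write".toList)]
      [(pvPat ++ ['7'], "discard_write".toList), (pvPat ++ ['8'], "discard_read_write".toList), (pvPat ++ ['9'], "atomic".toList)] _ _ rfl (by decide) (by decide) (by decide) (by decide) v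
  · obtain ⟨rfl, rfl⟩ := Prod.mk.injEq .. ▸ h
    exact pv_chain_hit_aux [(pvPat ++ ['4'], "read".toList), (pvPat ++ ['5'], "write".toList), (pvPat ++ ['6'], "read_write".toList)]
      [(pvPat ++ ['8'], "discard_read_write".toList), (pvPat ++ ['9'], "atomic".toList)] _ _ rfl (by decide) (by decide) (by decide) (by decide) v
  · obtain ⟨rfl, rfl⟩ := Prod.mk.injEq .. ▸ h
    exact pv_chain_hit_aux [(pvPat ++ ['4'], "read".toList), (pvPat ++ ['5'], "write".toList), (pvPat ++ ['6'], "read_write".toList), (pvPat ++ ['7'], "discard_write".toList)]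
      [(pvPat ++ ['9'], "atomic".toList)] _ _ rfl (by decide) (by decide) (by decide) (by decide) v
  · obtain ⟨rfl, rfl⟩ := Prod.mk.injEq .. ▸ h
    exact pv_chain_hit_aux [(pvPat ++ ['4'], "read".toList), (pvPat ++ ['5'], "write".toList), (pvPat ++ ['6'], "read_write".toList), (pvPat ++ ['7'], "discard_write".toList), (pvPat ++ ['8'], "discard_read_write".toList)]
      [] _ _ rfl (by decide) (by decide) (by decide) (by decide) v

theorem pv_char_eq_of_toNat (c d : Char) (h : c.toNat = d.toNat) : c = d := by
  apply Char.ext; exact UInt32.toNat_inj.mp h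

theorem pv_digit_cases (d : Char) (h4 : '4' ≤ d) (h9 : d ≤ '9') :
    d = '4' ∨ d = '5' ∨ d = '6' ∨ d = '7' ∨ d = '8' ∨ d = '9' := by
  have h1 : 52 ≤ d.toNat := h4
  have h2 : d.toNat ≤ 57 := h9
  have : d.toNat = 52 ∨ d.toNat = 53 ∨ d.toNat = 54 ∨ d.toNat = 55 ∨ d.toNat = 56 ∨ d.toNat = 57 := by omega
  rcases this with h | h | h | h | h | h
  · exact Or.inl (pv_char_eq_of_toNat _ _ h)
  · exact Or.inr (Or.inl (pv_char_eq_of_toNat _ _ h))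
  · exact Or.inr (Or.inr (Or.inl (pv_char_eq_of_toNat _ _ h)))
  · exact Or.inr (Or.inr (Or.inr (Or.inl (pv_char_eq_of_toNat _ _ h))))
  · exact Or.inr (Or.inr (Or.inr (Or.inr (Or.inl (pv_char_eq_of_toNat _ _ h)))))
  · exact Or.inr (Or.inr (Or.inr (Or.inr (Or.inr (pv_char_eq_of_toNat _ _ h)))))

theorem pv_pairs_shape : ∀ p ∈ pvPairs, p.1 = pvPat ++ [p.1.getD 28 ' '] ∧
    p.1.getD 28 ' ' ∈ (['4','5','6','7','8','9'] : List Char) := by decide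

theorem pv_digit_range : ∀ dg ∈ (['4','5','6','7','8','9'] : List Char), '4' ≤ dg ∧ dg ≤ '9' := by
  intro dg h; fin_cases h <;> exact ⟨by decide, by decide⟩

theorem pv_chain_eq_scan : ∀ l : List Char, pvChain l = pvScan l := by
  have main : ∀ (n : Nat) (l : List Char), l.length ≤ n → pvChain l = pvScan l := by
    intro n
    induction n with
    | zero =>
      intro l h
      have : l = [] := List.eq_nil_of_length_eq_zero (by omega)
      subst this
      unfold pvChain; rw [pv_foldl_nil]; simp [pvScan]
    | succ n ih =>
      intro l hlen
      cases l with
      | nil => unfold pvChain; rw [pv_foldl_nil]; simp [pvScan]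
      | cons c t =>
        cases hh : pvHit? (c :: t) with
        | some dg =>
          -- invert the hit test
          cases hdr : (c :: t).drop 28 with
          | nil => simp only [pvHit?, hdr] at hh; exact absurd hh (by simp)
          | cons d rest =>
            simp only [pvHit?, hdr] at hh
            by_cases hcond : pvPat.isPrefixOf (c :: t) ∧ '4' ≤ d ∧ d ≤ '9'
            · obtain ⟨hpre, h4, h9⟩ := hcond
              have hh2 : pvHit? (c :: t) = some d := by
                simp only [pvHit?, hdr]; rw [if_pos ⟨hpre, h4, h9⟩]
              obtain ⟨w, hw⟩ := List.isPrefixOf_iff_prefix.mp hpre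
              have hw28 : w = (c :: t).drop 28 := by
                rw [← hw, show (28 : Nat) = pvPat.length from rfl, List.drop_left]
              rw [hdr] at hw28
              have hl : c :: t = (pvPat ++ [d]) ++ rest := by
                rw [← hw, hw28]; simp
              have hrest : rest = t.drop 28 := by
                have h1 : (c :: t).drop 29 = rest := by
                  rw [show (29 : Nat) = 28 + 1 from rfl, ← List.drop_drop, hdr]; rfl
                rw [← h1, List.drop_succ_cons]
              have hlen' : rest.length ≤ n := by
                have hcl := congrArg List.length hl
                have hp28 : pvPat.length = 28 := rfl
                simp at hcl hlen ⊢
                omega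
              have hscan : pvScan (c :: t) = pvNames.getD (d.toNat - 52) [] ++ pvScan (t.drop 28) := by
                simp only [pvScan, hh2]
              rcases pv_digit_cases d h4 h9 with hd | hd | hd | hd | hd | hd <;> subst hd <;>
                rw [hscan, hl, ← hrest] <;>
                [rw [pv_chain_hit _ ("read".toList) (by decide) rest];
                 rw [pv_chain_hit _ ("write".toList) (by decide) rest];
                 rw [pv_chain_hit _ ("read_write".toList) (by decide) rest];
                 rw [pv_chain_hit _ ("discard_write".toList) (by decide) rest];
                 rw [pv_chain_hit _ ("discard_read_write".toList) (by decide) rest];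
                 rw [pv_chain_hit _ ("atomic".toList) (by decide) rest]] <;>
                rw [ih rest hlen'] <;> rfl
            · rw [if_neg hcond] at hh; cases hh
        | none =>
          have H : ∀ p ∈ pvPairs, ¬ p.1 <+: c :: t := by
            intro p hp hpre
            obtain ⟨hsh, hdgm⟩ := pv_pairs_shape p hp
            obtain ⟨h4, h9⟩ := pv_digit_range _ hdgm
            obtain ⟨w, hw⟩ := hpre
            rw [hsh] at hw
            have hdrop : (c :: t).drop 28 = p.1.getD 28 ' ' :: w := by
              rw [← hw, show (28 : Nat) = pvPat.length from rfl]
              simp [List.drop_left']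
            have hP : pvPat.isPrefixOf (c :: t) := by
              rw [List.isPrefixOf_iff_prefix, ← hw]
              exact ⟨[p.1.getD 28 ' '] ++ w, by simp⟩
            simp only [pvHit?, hdrop] at hh
            rw [if_pos ⟨hP, h4, h9⟩] at hh
            cases hh
          show pvPairs.foldl pvStep (c :: t) = _
          rw [pv_foldl_no_hit pvPairs (fun p hp => hp) c t H]
          simp only [pvScan, hh]
          show c :: pvChain t = c :: pvScan t
          rw [ih t (by simp at hlen; omega)]
  exact fun l => main l.length l le_rfl

theorem pv_A_eq_chain (s : String) :
    substitute_access_mode s = String.ofList (pvChain s.toList) := by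
  have hrepl : ∀ (x : String) (o n : String),
      PySem.Str.replace x o n = String.ofList (PySem.Chars.replace x.toList o.toList n.toList) :=
    fun _ _ _ => rfl
  have e4 : ("(sycl::_V1::access::mode)" ++ "1024").toList = pvPat ++ ['4'] := by decide
  have e5 : ("(sycl::_V1::access::mode)" ++ "1025").toList = pvPat ++ ['5'] := by decide
  have e6 : ("(sycl::_V1::access::mode)" ++ "1026").toList = pvPat ++ ['6'] := by decide
  have e7 : ("(sycl::_V1::access::mode)" ++ "1027").toList = pvPat ++ ['7'] := by decide
  have e8 : ("(sycl::_V1::access::mode)" ++ "1028").toList = pvPat ++ ['8'] := by decide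
  have e9 : ("(sycl::_V1::access::mode)" ++ "1029").toList = pvPat ++ ['9'] := by decide
  simp only [substitute_access_mode, List.foldl, hrepl, String.toList_ofList,
    e4, e5, e6, e7, e8, e9]
  rw [pv_replace_eq_rep _ _ _ (by decide), pv_replace_eq_rep _ _ _ (by decide),
    pv_replace_eq_rep _ _ _ (by decide), pv_replace_eq_rep _ _ _ (by decide),
    pv_replace_eq_rep _ _ _ (by decide), pv_replace_eq_rep _ _ _ (by decide)]
  rfl

-- ===== VERDICT (by name: the statement is the Claim_ definition above) =====
theorem substitute_access_mode_spec : Claim_equal_substitute_access_mode := by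
  intro s _
  show substitute_access_mode s = substitute_access_mode_alt s
  rw [pv_A_eq_chain, substitute_access_mode_alt, pv_chain_eq_scan]
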